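-- pv_equiv track=rewrite | github.com/oPqst/hackaci | CSS/Triangles.py | calculate_tape_length
-- ===== SOURCE A (Python) =====
-- def calculate_tape_length(columns, first_row, second_row):
--     tape_length = 0
--     for col in range(columns):
--         if first_row[col] == 1:
--             tape_length += 2  # Add 2 meters for the two sides of the triangular tile
--             if col == 0 or first_row[col - 1] == 0:  # If it's the beginning of a wet area
--                 tape_length += 1  # Add 1 meter for the corner
--             if col == columns - 1 or first_row[col + 1] == 0:  # If it's the end of a wet area
--                 tape_length += 1  # Add 1 meter for the corner
--         if second_row[col] == 1:
--             tape_length += 2  # Add 2 meters for the two sides of the triangular tile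
--             if col == 0 or second_row[col - 1] == 0:  # If it's the beginning of a wet area
--                 tape_length += 1  # Add 1 meter for the corner
--             if col == columns - 1 or second_row[col + 1] == 0:  # If it's the end of a wet area
--                 tape_length += 1  # Add 1 meter for the corner
--     return tape_length
-- ===== SOURCE B (Python) =====
-- def calculate_tape_length(columns, first_row, second_row):
--     def row_tape(row):
--         r = row[:max(columns, 0)]
--         if not r:
--             return 0
--         tiles = 0
--         for v in r:
--             if v == 1:
--                 tiles += 2
--         corners = (1 if r[0] == 1 else 0) + (1 if r[-1] == 1 else 0)
--         for a, b in zip(r, r[1:]):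
--             if a == 1 and b == 0:
--                 corners += 1
--             elif a == 0 and b == 1:
--                 corners += 1
--         return tiles + corners
--     return row_tape(first_row) + row_tape(second_row)
-- ===== Notes on version B (the rewrite author's own statement) =====
-- stated objective: alternative
-- what changed: Instead of A's single loop over column indices testing three neighbours per column and per row, B processes each row independently on its truncated prefix row[:columns]: 2 per tile equal to 1, one corner for an edge tile equal to 1, and one corner per adjacent pair forming a 1-0 or 0-1 transition.
import Mathlib
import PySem

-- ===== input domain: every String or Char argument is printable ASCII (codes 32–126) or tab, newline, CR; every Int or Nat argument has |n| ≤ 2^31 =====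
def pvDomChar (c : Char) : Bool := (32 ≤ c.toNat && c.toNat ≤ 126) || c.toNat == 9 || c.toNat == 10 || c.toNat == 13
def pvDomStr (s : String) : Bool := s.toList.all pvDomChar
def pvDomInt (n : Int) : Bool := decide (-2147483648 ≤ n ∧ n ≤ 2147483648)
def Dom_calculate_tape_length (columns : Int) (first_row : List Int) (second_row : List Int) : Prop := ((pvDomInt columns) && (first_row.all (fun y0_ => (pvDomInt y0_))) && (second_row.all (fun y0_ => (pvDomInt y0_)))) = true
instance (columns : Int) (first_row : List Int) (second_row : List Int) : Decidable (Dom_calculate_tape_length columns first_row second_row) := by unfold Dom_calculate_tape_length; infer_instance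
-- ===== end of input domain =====

-- B replaces A's per-column three-neighbour index tests with an independent per-row pass over
-- the truncated prefix (2 per tile, edge corners, adjacent-pair transition corners); same cost.


-- ===== PORT A =====
-- one column of A's loop body for one row; pyGetD's default 0 is never used under Pre_
def pvRowStepA (columns : Int) (row : List Int) (acc : Int) (col : Int) : Int :=
  if PySem.List.pyGetD row col 0 = 1 then
    let t := acc + 2
    let t := if col = 0 ∨ PySem.List.pyGetD row (col - 1) 0 = 0 then t + 1 else t
    if col = columns - 1 ∨ PySem.List.pyGetD row (col + 1) 0 = 0 then t + 1 else t
  else acc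

def calculate_tape_length (columns : Int) (first_row : List Int) (second_row : List Int) : Int :=
  (PySem.List.pyRange 0 columns 1).foldl
    (fun tape_length col => pvRowStepA columns second_row (pvRowStepA columns first_row tape_length col) col)
    0

-- ===== PORT B =====
-- row_tape from Source B: truncated prefix, 2 per tile, edge corners, transition corners
-- (corners accumulator: seeded with the two edge corners, then the pair loop adds onto it)
def pvRowTapeGo (r : List Int) : Int :=
  if r = [] then 0
  else
    r.foldl (fun t v => if v = 1 then t + 2 else t) 0
      + (r.zip (PySem.List.slice r (some 1) none)).foldl
          (fun c ab => if ab.1 = 1 ∧ ab.2 = 0 then c + 1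
                       else if ab.1 = 0 ∧ ab.2 = 1 then c + 1 else c)
          ((if PySem.List.pyGetD r 0 0 = 1 then 1 else 0)
            + (if PySem.List.pyGetD r (-1) 0 = 1 then 1 else 0))

def pvRowTape (columns : Int) (row : List Int) : Int :=
  pvRowTapeGo (PySem.List.slice row none (some (max columns 0)))

def calculate_tape_length_alt (columns : Int) (first_row : List Int) (second_row : List Int) : Int :=
  pvRowTape columns first_row + pvRowTape columns second_row

-- ===== PRECONDITION & SPEC =====
-- Pre_ excludes exactly the inputs on which A raises IndexError: a row shorter than columns.
def Pre_calculate_tape_length (columns : Int) (first_row : List Int) (second_row : List Int) : Prop :=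
  columns ≤ (first_row.length : Int) ∧ columns ≤ (second_row.length : Int)
instance (columns : Int) (first_row : List Int) (second_row : List Int) : Decidable (Pre_calculate_tape_length columns first_row second_row) := by unfold Pre_calculate_tape_length; infer_instance

def pvWitness_calculate_tape_length : Int × List Int × List Int := (3, [1, 0, 1], [0, 1, 1])

def Spec_calculate_tape_length (columns : Int) (first_row : List Int) (second_row : List Int) (out : Int) : Prop := out = calculate_tape_length_alt columns first_row second_row
instance (columns : Int) (first_row : List Int) (second_row : List Int) (out : Int) : Decidable (Spec_calculate_tape_length columns first_row second_row out) := by unfold Spec_calculate_tape_length; infer_instance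

-- ===== CLAIM (what is proved, stated in full; the proofs are below) =====
def Claim_equal_calculate_tape_length : Prop := ∀ (columns : Int) (first_row : List Int) (second_row : List Int), Dom_calculate_tape_length columns first_row second_row → Pre_calculate_tape_length columns first_row second_row → Spec_calculate_tape_length columns first_row second_row (calculate_tape_length columns first_row second_row)

-- ===== LEMMAS AND PROOFS =====

-- common spec: per-row tape length of a list, given the value before the list (0 encodes "edge",
-- matching A's short-circuit 'col == 0 or row[col-1] == 0') and a value nv standing for the
-- entry after the list (0 at the true end)
def pvSpec3 (p : Int) (r : List Int) (nv : Int) : Int :=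
  match r with
  | [] => 0
  | v :: rest =>
      (if v = 1 then
        2 + (if p = 0 then 1 else 0) + (if rest.head?.getD nv = 0 then 1 else 0)
       else 0) + pvSpec3 v rest nv

theorem pvSpec3_append (x nv : Int) : ∀ (r : List Int) (p : Int),
    pvSpec3 p (r ++ [x]) nv
      = pvSpec3 p r x
        + (if x = 1 then 2 + (if r.getLast?.getD p = 0 then 1 else 0) + (if nv = 0 then 1 else 0) else 0) := by
  intro r
  induction r with
  | nil => intro p; simp [pvSpec3]; ring
  | cons v rest ih =>
      intro p
      simp only [List.cons_append, pvSpec3, ih v, List.getLast?_cons]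
      cases rest with
      | nil => simp [pvSpec3]; ring
      | cons w rest' => simp; ring

def pvContrib (n : Int) (row : List Int) (col : Int) : Int :=
  if PySem.List.pyGetD row col 0 = 1 then
    2 + (if col = 0 ∨ PySem.List.pyGetD row (col - 1) 0 = 0 then 1 else 0)
      + (if col = n - 1 ∨ PySem.List.pyGetD row (col + 1) 0 = 0 then 1 else 0)
  else 0

theorem pvRowStepA_eq (n : Int) (row : List Int) (acc col : Int) :
    pvRowStepA n row acc col = acc + pvContrib n row col := by
  unfold pvRowStepA pvContrib
  split_ifs <;> ring

-- A's partial sums over the first k columns equal the spec of the length-k prefix,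
-- with the entry at position k (0 once k = n) as the "next" value
theorem pvSumA_aux (row : List Int) (n : ℕ) (hn : n ≤ row.length) :
    ∀ k : ℕ, k ≤ n →
    ((PySem.List.pyRange 0 (k : Int) 1).map (pvContrib (n : Int) row)).sum
      = pvSpec3 0 (row.take k) (if k = n then 0 else row.getD k 0) := by
  intro k
  induction k with
  | zero => intro _; simp [PySem.List.pyRange_one_eq_nil, pvSpec3]
  | succ k ih =>
      intro hk1
      have hk : k < n := by omega
      have hkl : k < row.length := by omega
      have hrange : PySem.List.pyRange 0 ((k + 1 : ℕ) : Int) 1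
          = PySem.List.pyRange 0 (k : Int) 1 ++ [(k : Int)] := by
        push_cast
        exact PySem.List.pyRange_one_succ_right (by positivity)
      rw [hrange, List.map_append, List.sum_append, ih (by omega)]
      have htake : row.take (k + 1) = row.take k ++ [row[k]] := by
        rw [List.take_add_one]
        simp [List.getElem?_eq_getElem hkl]
      have hnvk : (if k = n then (0 : Int) else row.getD k 0) = row[k] := by
        rw [if_neg (by omega)]
        simp [List.getD_eq_getElem?_getD, List.getElem?_eq_getElem hkl]
      rw [htake, pvSpec3_append, hnvk]
      simp only [List.map_cons, List.map_nil, List.sum_cons, List.sum_nil, add_zero]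
      have hget : PySem.List.pyGetD row (k : Int) 0 = row[k] := by
        simp [PySem.List.pyGetD_natCast, List.getD_eq_getElem?_getD, List.getElem?_eq_getElem hkl]
      have hlast : (if (k : Int) = 0 ∨ PySem.List.pyGetD row ((k : Int) - 1) 0 = 0 then (1 : Int) else 0)
          = (if (row.take k).getLast?.getD (0 : Int) = 0 then 1 else 0) := by
        cases k with
        | zero => simp
        | succ j =>
            have hj : j < row.length := by omega
            have hc : ((j + 1 : ℕ) : Int) - 1 = (j : Int) := by push_cast; ring
            have h0 : ¬ (((j + 1 : ℕ) : Int) = 0) := by omega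
            have hlen : (row.take (j + 1)).length = j + 1 := by
              simp [List.length_take]; omega
            have hgl : (row.take (j + 1)).getLast? = some row[j] := by
              rw [List.getLast?_eq_getElem?, hlen]
              simp [List.getElem?_eq_getElem hj]
            have hg2 : PySem.List.pyGetD row (j : Int) 0 = row[j] := by
              simp [List.getD_eq_getElem?_getD, List.getElem?_eq_getElem hj]
            have h0' : ¬ ((j : Int) + 1 = 0) := by omega
            rw [hc, hgl, hg2]
            simp [h0']
      have hnext : (if (k : Int) = (n : Int) - 1 ∨ PySem.List.pyGetD row ((k : Int) + 1) 0 = 0 then (1 : Int) else 0)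
          = (if (if k + 1 = n then (0 : Int) else row.getD (k + 1) 0) = 0 then 1 else 0) := by
        by_cases h : k + 1 = n
        · have hn1 : (k : Int) = (n : Int) - 1 := by omega
          rw [if_pos (Or.inl hn1)]
          simp [h]
        · have h2 : ¬ ((k : Int) = (n : Int) - 1) := by omega
          have hg3 : PySem.List.pyGetD row ((k : Int) + 1) 0 = row.getD (k + 1) 0 := by
            have hcc : ((k : Int) + 1) = ((k + 1 : ℕ) : Int) := by push_cast; ring
            rw [hcc, PySem.List.pyGetD_natCast]
          rw [if_neg h, hg3]
          simp [h2]
      unfold pvContrib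
      rw [hget, hlast, hnext]

-- the generalized-accumulator forms of B's two loops
theorem pvTiles_shift : ∀ (r : List Int) (a : Int),
    r.foldl (fun t v => if v = 1 then t + 2 else t) a
      = a + r.foldl (fun t v => if v = 1 then t + 2 else t) 0 := by
  intro r
  induction r with
  | nil => intro a; simp
  | cons v rest ih =>
      intro a
      simp only [List.foldl_cons]
      rw [ih, ih (if v = 1 then 0 + 2 else 0)]
      split_ifs <;> ring

theorem pvPairs_shift : ∀ (l : List (Int × Int)) (a : Int),
    l.foldl (fun c ab => if ab.1 = 1 ∧ ab.2 = 0 then c + 1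
                         else if ab.1 = 0 ∧ ab.2 = 1 then c + 1 else c) a
      = a + l.foldl (fun c ab => if ab.1 = 1 ∧ ab.2 = 0 then c + 1
                         else if ab.1 = 0 ∧ ab.2 = 1 then c + 1 else c) 0 := by
  intro l
  induction l with
  | nil => intro a; simp
  | cons ab rest ih =>
      intro a
      simp only [List.foldl_cons]
      rw [ih, ih (if ab.1 = 1 ∧ ab.2 = 0 then 0 + 1 else if ab.1 = 0 ∧ ab.2 = 1 then 0 + 1 else 0)]
      split_ifs <;> ring

-- B's closed per-row formula equals the spec
theorem pvSpec3_closed : ∀ (r : List Int) (p : Int), r ≠ [] →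
    pvSpec3 p r 0
      = r.foldl (fun t v => if v = 1 then t + 2 else t) 0
        + ((if p = 0 ∧ r.head?.getD 0 = 1 then 1 else 0) + (if r.getLast?.getD 0 = 1 then 1 else 0))
        + (r.zip r.tail).foldl (fun c ab => if ab.1 = 1 ∧ ab.2 = 0 then c + 1
            else if ab.1 = 0 ∧ ab.2 = 1 then c + 1 else c) 0 := by
  intro r
  induction r with
  | nil => intro p h; exact absurd rfl h
  | cons v rest ih =>
      intro p _
      cases rest with
      | nil =>
          simp [pvSpec3]
          split_ifs <;> omega
      | cons w rest' =>
          have hL : pvSpec3 p (v :: w :: rest') 0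
              = (if v = 1 then 2 + (if p = 0 then 1 else 0) + (if w = 0 then 1 else 0) else 0)
                + pvSpec3 v (w :: rest') 0 := rfl
          have hT : (v :: w :: rest').foldl (fun t v => if v = 1 then t + 2 else t) 0
              = (if v = 1 then (2 : Int) else 0)
                + (w :: rest').foldl (fun t v => if v = 1 then t + 2 else t) 0 := by
            rw [List.foldl_cons, pvTiles_shift (w :: rest')]
            split_ifs <;> ring
          have hZ : ((v :: w :: rest').zip (v :: w :: rest').tail).foldl
                (fun c ab => if ab.1 = 1 ∧ ab.2 = 0 then c + 1
                    else if ab.1 = 0 ∧ ab.2 = 1 then c + 1 else c) 0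
              = (if v = 1 ∧ w = 0 then (1 : Int) else if v = 0 ∧ w = 1 then 1 else 0)
                + ((w :: rest').zip rest').foldl
                    (fun c ab => if ab.1 = 1 ∧ ab.2 = 0 then c + 1
                        else if ab.1 = 0 ∧ ab.2 = 1 then c + 1 else c) 0 := by
            simp only [List.tail_cons, List.zip_cons_cons, List.foldl_cons]
            rw [pvPairs_shift ((w :: rest').zip rest')]
            split_ifs <;> ring
          rw [hL, ih v (by simp), hT, hZ]
          simp only [List.head?_cons, Option.getD_some, List.getLast?_cons_cons, List.tail_cons]
          split_ifs <;> omega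

theorem pvRowTapeGo_eq (r : List Int) : pvRowTapeGo r = pvSpec3 0 r 0 := by
  unfold pvRowTapeGo
  by_cases hnil : r = []
  · simp [hnil, pvSpec3]
  · rw [if_neg hnil, PySem.List.slice_from_one]
    have hhead : PySem.List.pyGetD r 0 0 = r.head?.getD 0 := by
      simp [PySem.List.pyGetD_zero, List.getD_eq_getElem?_getD, List.head?_eq_getElem?]
    have hlast : PySem.List.pyGetD r (-1) 0 = r.getLast?.getD 0 := by
      rw [PySem.List.pyGetD_neg_one r 0 hnil, List.getLast?_eq_some_getLast (l := r) hnil]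
      simp
    rw [hhead, hlast,
      pvPairs_shift (r.zip r.tail)
        ((if r.head?.getD 0 = 1 then 1 else 0) + (if r.getLast?.getD 0 = 1 then 1 else 0)),
      pvSpec3_closed r 0 hnil]
    simp only [true_and]
    ring

theorem pvRowTape_eq_spec (columns : Int) (row : List Int) :
    pvRowTape columns row = pvSpec3 0 (row.take (max columns 0).toNat) 0 := by
  unfold pvRowTape
  rw [PySem.List.slice_to row (le_max_right columns 0), pvRowTapeGo_eq]

theorem pvCalcA_eq (columns : Int) (first_row second_row : List Int)
    (h1 : columns ≤ (first_row.length : Int)) (h2 : columns ≤ (second_row.length : Int)) :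
    calculate_tape_length columns first_row second_row
      = pvSpec3 0 (first_row.take (max columns 0).toNat) 0
        + pvSpec3 0 (second_row.take (max columns 0).toNat) 0 := by
  unfold calculate_tape_length
  have hstep : (fun tape_length col =>
      pvRowStepA columns second_row (pvRowStepA columns first_row tape_length col) col)
      = fun (acc col : Int) => acc + (pvContrib columns first_row col + pvContrib columns second_row col) := by
    funext acc col
    rw [pvRowStepA_eq, pvRowStepA_eq]; ring
  rw [hstep, PySem.List.foldl_add, PySem.List.sum_map_add_int]
  by_cases hc : 0 ≤ columns
  · have hmax : max columns 0 = columns := max_eq_left hc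
    have hcast : ((columns.toNat : ℕ) : Int) = columns := Int.toNat_of_nonneg hc
    have e1 := pvSumA_aux first_row columns.toNat (by omega) columns.toNat (le_refl _)
    have e2 := pvSumA_aux second_row columns.toNat (by omega) columns.toNat (le_refl _)
    rw [hcast] at e1 e2
    simp only [if_true] at e1 e2
    rw [e1, e2, hmax]
    ring
  · have hnil : PySem.List.pyRange 0 columns 1 = [] :=
      PySem.List.pyRange_one_eq_nil (by omega)
    have hmax : (max columns 0).toNat = 0 := by omega
    simp [hnil, hmax, pvSpec3]

-- ===== VERDICT (by name: the statement is the Claim_ definition above) =====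
theorem calculate_tape_length_spec : Claim_equal_calculate_tape_length := by
  intro columns first_row second_row _ hpre
  unfold Spec_calculate_tape_length calculate_tape_length_alt
  rw [pvCalcA_eq columns first_row second_row hpre.1 hpre.2,
    pvRowTape_eq_spec, pvRowTape_eq_spec]
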